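-- pv_equiv track=rewrite | github.com/trungpro5398/Competitive-programming | CP problems/ICPC/template.py | pre_cal
-- ===== SOURCE A (Python) =====
-- def pre_cal(string):
-- 	right = len(string) - 1
-- 	location = [0] * len(string)
-- 	for i in range(len(string)):
-- 		location[i] = right
-- 		right += 1
-- 		if right == len(string):
-- 			right = 0
-- 	return location
-- ===== SOURCE B (Python) =====
-- def pre_cal(string):
--     idx = list(range(len(string)))
--     return idx[-1:] + idx[:-1]
-- ===== Notes on version B (the rewrite author's own statement) =====
-- stated objective: simpler
-- what changed: Replaces A's stateful running counter with its wraparound branch by building the identity index list and right-rotating it by one via slicing.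
import Mathlib
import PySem

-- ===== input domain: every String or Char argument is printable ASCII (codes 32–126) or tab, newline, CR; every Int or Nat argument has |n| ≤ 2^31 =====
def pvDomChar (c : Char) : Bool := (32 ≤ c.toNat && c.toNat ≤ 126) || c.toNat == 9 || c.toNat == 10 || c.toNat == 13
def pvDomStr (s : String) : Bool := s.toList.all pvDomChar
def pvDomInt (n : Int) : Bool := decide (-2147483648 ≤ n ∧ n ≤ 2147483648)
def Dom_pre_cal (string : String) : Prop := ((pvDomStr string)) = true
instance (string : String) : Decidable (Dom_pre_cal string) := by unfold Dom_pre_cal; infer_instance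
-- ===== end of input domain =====

-- B replaces A's running counter with its wraparound branch by building the identity index list and right-rotating it by one via slicing (objective: simpler).


-- ===== PORT A =====
-- loop body of A: location[i] = right; right += 1; if right == len(string): right = 0
def pvStep (n : Int) (st : Int × List Int) (i : Int) : Int × List Int :=
  let loc := PySem.List.pySetD st.2 i st.1
  let right := st.1 + 1
  if right = n then (0, loc) else (right, loc)

def pre_cal (string : String) : List Int :=
  let n : Int := (string.toList.length : Int)
  let location : List Int := List.replicate string.toList.length 0
  let res := (PySem.List.pyRange 0 n 1).foldl (pvStep n) (n - 1, location)
  res.2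

-- ===== PORT B =====
def pre_cal_alt (string : String) : List Int :=
  let idx : List Int := (List.range string.toList.length).map (fun i => (i : Int))
  PySem.List.slice idx (some (-1)) none ++ PySem.List.slice idx none (some (-1))

-- ===== PRECONDITION & SPEC =====
def Spec_pre_cal (string : String) (out : List Int) : Prop := out = pre_cal_alt string
instance (string : String) (out : List Int) : Decidable (Spec_pre_cal string out) := by unfold Spec_pre_cal; infer_instance

-- ===== CLAIM (what is proved, stated in full; the proofs are below) =====
def Claim_equal_pre_cal : Prop := ∀ (string : String), Dom_pre_cal string → Spec_pre_cal string (pre_cal string)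

-- ===== LEMMAS AND PROOFS =====

-- invariant of A's loop after the first (resetting) iteration: for 1 ≤ a ≤ n,
-- folding over range(a, n) from state (a-1, loc) fills positions a..n-1 with a-1..n-2
lemma pre_cal_aux (m : Nat) : ∀ (n a : Nat) (loc : List Int), loc.length = n → 1 ≤ a → a + m = n →
    ((PySem.List.pyRange (a : Int) (n : Int) 1).foldl (pvStep (n : Int)) ((a : Int) - 1, loc)).2
      = loc.take a ++ (List.range' (a - 1) m).map (fun j => (j : Int)) := by
  induction m with
  | zero =>
    intro n a loc hlen h1 h2
    rw [PySem.List.pyRange_one_eq_nil (by omega)]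
    simp [hlen]
    omega
  | succ m ih =>
    intro n a loc hlen h1 h2
    rw [PySem.List.pyRange_one_cons (by exact_mod_cast (by omega : a < n))]
    rw [List.foldl_cons]
    have hstep : pvStep (n : Int) ((a : Int) - 1, loc) (a : Int) = ((a : Int), PySem.List.pySetD loc (a : Int) ((a : Int) - 1)) := by
      simp only [pvStep]
      rw [if_neg (by omega)]
      norm_num
    rw [hstep]
    have hset : PySem.List.pySetD loc (a : Int) ((a : Int) - 1) = loc.set a ((a : Int) - 1) :=
      PySem.List.pySetD_natCast loc a _
    have hih := ih n (a + 1) (loc.set a ((a : Int) - 1)) (by simpa using hlen) (by omega) (by omega)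
    push_cast at hih
    simp only [add_sub_cancel_right] at hih
    rw [hset, hih]
    -- take (a+1) of the set list = take a loc ++ [a-1]
    have hlt : a < loc.length := by omega
    rw [List.set_eq_take_append_cons_drop, if_pos hlt]
    have htk : ((loc.take a ++ ((a : Int) - 1) :: loc.drop (a + 1)).take (a + 1))
        = loc.take a ++ [((a : Int) - 1)] := by
      have hlta : (loc.take a).length = a := by simp; omega
      rw [show a + 1 = (loc.take a).length + 1 by omega, List.take_append]
      simp
    rw [htk]
    have hr : List.range' (a - 1) (m + 1) = (a - 1) :: List.range' a m := by
      rw [List.range'_succ, show a - 1 + 1 = a by omega]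
    rw [hr]
    simp [List.append_assoc, show ((a - 1 : Nat) : Int) = (a : Int) - 1 by omega]

-- ===== VERDICT (by name: the statement is the Claim_ definition above) =====
theorem pre_cal_spec : Claim_equal_pre_cal := by
  intro string _
  unfold Spec_pre_cal pre_cal pre_cal_alt
  cases h : string.toList.length with
  | zero =>
    simp [PySem.List.pyRange_one_eq_nil, PySem.List.slice]
  | succ k =>
    show (((PySem.List.pyRange 0 ((k + 1 : Nat) : Int) 1).foldl (pvStep ((k + 1 : Nat) : Int))
        (((k + 1 : Nat) : Int) - 1, List.replicate (k + 1) (0 : Int))).2)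
      = PySem.List.slice ((List.range (k + 1)).map (fun i => (i : Int))) (some (-1)) none
        ++ PySem.List.slice ((List.range (k + 1)).map (fun i => (i : Int))) none (some (-1))
    have hcons : PySem.List.pyRange 0 ((k + 1 : Nat) : Int) 1
        = 0 :: PySem.List.pyRange 1 ((k + 1 : Nat) : Int) 1 := by
      rw [PySem.List.pyRange_one_cons (by push_cast; omega), zero_add]
    rw [hcons, List.foldl_cons]
    have hstep : pvStep ((k + 1 : Nat) : Int) (((k + 1 : Nat) : Int) - 1, List.replicate (k + 1) (0 : Int)) 0
        = (0, (((k + 1 : Nat) : Int) - 1) :: List.replicate k (0 : Int)) := by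
      simp only [pvStep]
      rw [if_pos (by omega)]
      congr 1
      rw [show PySem.List.pySetD (List.replicate (k + 1) (0 : Int)) 0 (((k + 1 : Nat) : Int) - 1)
            = (List.replicate (k + 1) (0 : Int)).set 0 (((k + 1 : Nat) : Int) - 1)
          from PySem.List.pySetD_natCast (n := 0) _ _]
      simp [List.replicate_succ]
    rw [hstep]
    have haux := pre_cal_aux k (k + 1) 1 ((((k + 1 : Nat) : Int) - 1) :: List.replicate k (0 : Int))
      (by simp) (le_refl 1) (by omega)
    norm_num at haux
    push_cast
    rw [show ((k : Int) + 1 - 1) = (k : Int) by ring, haux]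
    rw [PySem.List.slice_from_neg_one, PySem.List.slice_to_neg_one]
    simp [List.range_succ, List.range_eq_range']
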